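/- GENERATED by mk_final_copies.py from the proof of the farm's unit `codebook_decode_scalar_raw.3` (farm:codebook_decode_scalar_raw.3.1: Proof.lean) as the
   re-elaboration sweep compiled it — do not edit. -/
import Asan.CheckWalk
import Vorbis.Spec.Units.codebook_decode_scalar_raw_3
import Vorbis.Spec.Worked.codebook_decode_scalar_raw_3_Lemmas

open X86 X86.User Asan Vorbis Vorbis.Spec Vorbis.Spec.codebook_decode_scalar_raw_3

set_option maxRecDepth 4000
set_option maxHeartbeats 4000000

/-- Segment 3 of `codebook_decode_scalar_raw` (0x10d7c1 – 0x10d8de, C lines 1724 – 1739): the linear search. From `AtLinear` at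
`cut7` (0x10d8a5, `i := 0`) through the loop at `loop2` (0x10d7dc; invariant: r12 = i ≤ entries, the memory differs from that of
the segment's entry `u` only in the scratch part of the own frame `[e.rsp − 96, e.rsp − 56)`, the slots the body loads; measure
`entries − i`) to `AtExit` at `cut5` (0x10d775) on three paths: the match with enough bits (`return i`), the match with too few
bits (`valid_bits := 0`, −1), no match (`error(f, 21)`, `valid_bits := 0`, −1). The pure facts are in Lemmas.lean. -/
theorem Vorbis.Spec.Worked.codebook_decode_scalar_raw_3_ok : Vorbis.Spec.codebook_decode_scalar_raw_3.Statement := by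
  intro Lay hLay μ hμ u₀ hcode hload8 hload1 hload4 h_error hstore4 others frames Blk len ret e u hat
  obtain ⟨hrip, hcommon, hc, hf, hcw, hcwne, hent⟩ := hat
  obtain ⟨hmid, hpre, hreader, hcb, hapart⟩ := hcommon
  have hmidU := hmid
  obtain ⟨he, hrsp, hra, h15, h14, h13, h12, hbp, hbx, hsame, hcodeok, hinv, hun⟩ := hmid
  v_entry he
  have herr := h_error others frames
  have hdf := hinv.1
  have hmx := hinv.2
  have hsse := Vorbis.sseOK_of_abiInv hinv
  have hspan : Mem.EqOn Vorbis.L.textLo Vorbis.L.textHi u₀.mem u.mem := hcodeok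
  simp only [X86.User.Spec.footprint, vspec] at hsame
  -- the ghost facts: the live set, where `*f` and the struct at `c` are
  have hL := hpre.reader.env.live
  have hinvE := hpre.reader.shadow.inv
  have hoffT := hpre.reader.shadow.offText
  have hfw := hpre.reader.where_obj
  have hbitsU := hreader.bits
  have hsp0 : Codebook.sparse u.mem (e.reg .rsi).toNat = 0 := (hcb.codewords_ne_zero_iff hpre.ok).mp hcwne
  have hK3 := hcb.K3.dense hsp0
  obtain ⟨B, hB, hBin⟩ := hpre.book
  have hcwh : (e.reg .rsi).toNat + 2120 ≤ 0xC00000 ∧ 0x119d40 ≤ (e.reg .rsi).toNat ∧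
      ((e.reg .rsi).toNat + 2120 ≤ (e.reg .rsp).toNat - 384 ∨ (e.reg .rsp).toNat + 8 ≤ (e.reg .rsi).toNat) := by
    have hw := blk_where hL hinvE hoffT (by omega) hB (by
      simp only [vblock, voff] at hBin
      omega)
    simp only [vblock, voff] at hBin
    have e1 : L.textHi = 0x119d40 := rfl
    omega
  have hfwh : (e.reg .rdi).toNat + 1808 ≤ 0xC00000 ∧ 0x119d40 ≤ (e.reg .rdi).toNat ∧
      ((e.reg .rdi).toNat + 1808 ≤ (e.reg .rsp).toNat - 384 ∨ (e.reg .rsp).toNat + 8 ≤ (e.reg .rdi).toNat) := by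
    omega
  have hfc : (e.reg .rsi).toNat + 2120 ≤ (e.reg .rdi).toNat ∨ (e.reg .rdi).toNat + 1808 ≤ (e.reg .rsi).toNat := by
    have hb := hapart.book
    simp only [vblock, voff] at hb
    exact hb
  -- the ghost values: `entries`, the two pointers
  obtain ⟨ent, hentd⟩ : ∃ ent : Nat, (Codebook.entries u.mem (e.reg .rsi).toNat).toNat = ent := ⟨_, rfl⟩
  obtain ⟨clp, hclpd⟩ : ∃ clp : Nat, Codebook.codeword_lengths u.mem (e.reg .rsi).toNat = clp := ⟨_, rfl⟩
  obtain ⟨cwp, hcwpd⟩ : ∃ cwp : Nat, Codebook.codewords u.mem (e.reg .rsi).toNat = cwp := ⟨_, rfl⟩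
  have hent_lt : ent < 2 ^ 24 := by
    have h1 := hcb.K1.ent_lt
    omega
  have hentI : Codebook.entries u.mem (e.reg .rsi).toNat = (ent : Int) := by
    have h1 := hcb.K1.ent_nonneg
    omega
  have hclB : Blk ⟨clp, ent⟩ := by
    have h := hK3.lengths
    rw [hclpd, hentd] at h
    exact h
  have hcwB : Blk ⟨cwp, 4 * ent⟩ := by
    have h := hK3.codewords
    rw [hcwpd, hentd] at h
    exact h
  -- where the two blocks are (when they are not empty), and that `*f` does not meet the lengths
  have hclw : 1 ≤ ent → clp + ent ≤ 0xC00000 ∧ 0x119d40 ≤ clp ∧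
      (clp + ent ≤ (e.reg .rsp).toNat - 384 ∨ (e.reg .rsp).toNat + 8 ≤ clp) := by
    intro h1
    have hw := blk_where hL hinvE hoffT (by omega) hclB h1
    have e1 : L.textHi = 0x119d40 := rfl
    simp only [] at hw
    omega
  have hcww : 1 ≤ ent → cwp + 4 * ent ≤ 0xC00000 ∧ 0x119d40 ≤ cwp ∧
      (cwp + 4 * ent ≤ (e.reg .rsp).toNat - 384 ∨ (e.reg .rsp).toNat + 8 ≤ cwp) := by
    intro h1
    have hw := blk_where hL hinvE hoffT (by omega) hcwB (by
      simp only []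
      omega)
    have e1 : L.textHi = 0x119d40 := rfl
    simp only [] at hw
    omega
  have hclf : clp + ent ≤ (e.reg .rdi).toNat ∨ (e.reg .rdi).toNat + 1808 ≤ clp := by
    have h := hapart.lengths
    unfold Codebook.clBlock at h
    rw [Codebook.N_dense hsp0, hclpd, hentd] at h
    simp only [vblock, voff] at h
    exact h
  -- the loads of the segment, in the ghost values
  have hcl : u.mem.readLE (e.reg .rsi + 8) 8 = clp := by
    rw [← hclpd]
    simp only [vacc, voff]
    show u.mem.readLE (e.reg .rsi + 8) 8 = u.mem.readLE (addr ((e.reg .rsi).toNat + 8)) 8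
    rw [← addr_add_lit, addr_toNat]
  rw [hcwpd] at hcw
  rw [hentd] at hent
  -- 0x10d8a5 (C line 1724): `i := 0`, to the loop head
  u_walk hcode [hμ.vendor] until [Vorbis.L.codebook_decode_scalar_raw.loop2] span [Vorbis.L.textLo, Vorbis.L.textHi] side (v_side)
  -- THE LOOP HEAD 0x10d7dc (C line 1724 `for (i=0; i < c->entries; ++i)`): r12 = i ≤ entries; the memory differs from that of
  -- the segment's entry only in the scratch part of the own frame
  obtain ⟨i, w_r12i, hi⟩ : ∃ i : Nat, s_10d8ab.reg .r12 = UInt64.ofNat i ∧ i ≤ ent :=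
    ⟨0, w_r12, Nat.zero_le _⟩
  have hS : Mem.SameExcept [⟨(e.reg .rsp).toNat - 96, (e.reg .rsp).toNat - 56⟩] u.mem s_10d8ab.mem := by
    u_same
  have w_rsp : s_10d8ab.reg .rsp = e.reg .rsp - 88 := by
    rw [w_kept .rsp rfl]
    exact hrsp
  have w_rbp : s_10d8ab.reg .rbp = e.reg .rsi := by
    rw [w_kept .rbp rfl]
    exact hc
  have sf : UInt64.ofNat (s_10d8ab.mem.readLE (e.reg .rsp - 80) 8) = e.reg .rdi := by
    rw [w_mem]
    exact hf
  have scw : s_10d8ab.mem.readLE (e.reg .rsp - 72) 8 = cwp := by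
    rw [w_mem]
    exact hcw
  have sent : s_10d8ab.mem.readLE (e.reg .rsp - 64) 4 = ent := by
    rw [w_mem]
    exact hent
  have scl : s_10d8ab.mem.readLE (e.reg .rsi + 8) 8 = clp := by
    rw [w_mem]
    exact hcl
  have sra : UInt64.ofNat (s_10d8ab.mem.readLE (e.reg .rsp) 8) = ret := by
    rw [w_mem]
    exact hra
  have s15 : UInt64.ofNat (s_10d8ab.mem.readLE (e.reg .rsp - 8) 8) = e.reg .r15 := by
    rw [w_mem]
    exact h15
  have s14 : UInt64.ofNat (s_10d8ab.mem.readLE (e.reg .rsp - 16) 8) = e.reg .r14 := by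
    rw [w_mem]
    exact h14
  have s13 : UInt64.ofNat (s_10d8ab.mem.readLE (e.reg .rsp - 24) 8) = e.reg .r13 := by
    rw [w_mem]
    exact h13
  have s12 : UInt64.ofNat (s_10d8ab.mem.readLE (e.reg .rsp - 32) 8) = e.reg .r12 := by
    rw [w_mem]
    exact h12
  have sbp : UInt64.ofNat (s_10d8ab.mem.readLE (e.reg .rsp - 40) 8) = e.reg .rbp := by
    rw [w_mem]
    exact hbp
  have sbx : UInt64.ofNat (s_10d8ab.mem.readLE (e.reg .rsp - 48) 8) = e.reg .rbx := by
    rw [w_mem]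
    exact hbx
  have hdfS : s_10d8ab.flags .df = false := by
    rw [w_flags]
    exact hdf
  have hmxS : s_10d8ab.mxcsr &&& 0x1F80 = 0x1F80 := by
    rw [w_mxcsr]
    exact hmx
  replace w_kept := w_kept.mono_all (S' := [.rax, .rcx, .rdx, .rbx, .rdi, .rsp, .rbp, .r12, .r13, .r14, .r15]) (by rfl)
  clear w_mem w_flags w_mxcsr w_r12
  u_loop [i] (fun v => ent - (v.reg .r12).toNat)
  -- the comparison `i < c->entries` in numbers
  have hcmpE := entries_toInt ent (by omega)
  have hcmpI := counter_toInt i (by omega)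
  u_walk hcode [hμ.vendor] until [Vorbis.L.codebook_decode_scalar_raw.loop2, Vorbis.L.codebook_decode_scalar_raw.cut5, Vorbis.L.codebook_decode_scalar_raw.chk16] span [Vorbis.L.textLo, Vorbis.L.textHi] side (v_side)
  · -- 0x10d8bd `call error`: DF and the MXCSR masks
    v_inv
  · -- the precondition of `error(f, VORBIS_invalid_stream)`
    have hun1 : ShadowUntouched u.mem s_10d8bd.mem := by v_untouched
    refine ⟨hpre.reader.shadow.callee (hun.trans hun1) ?_ ?_ ?_, ?_⟩
    · rw [w_rsp]
      u_omega
    · rw [w_rsp]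
      u_omega
    · rw [w_rsp]
      u_omega
    · rw [w_rdi]
      exact hpre.reader.env.obj
  · -- 0x10d8c2 (C line 1738): after `error`: `f->valid_bits = 0 ; return -1`
    v_after_call w_rsp_10d8bd w_mem_10d8bd
    simp only [w_rdi_10d8bd] at w_same
    u_walk hcode [hμ.vendor] until [Vorbis.L.codebook_decode_scalar_raw.cut5] span [Vorbis.L.textLo, Vorbis.L.textHi] side (v_side)
    · -- 0x10d8c9: the check of the store `f->valid_bits = 0`
      have hun2 : ShadowUntouched u.mem s_10d8c9.mem := by v_untouched
      have hs : Site (Live (stackObjs frames ++ others)) ((e.reg .rdi).toNat + 1768) 4 :=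
        hbitsU.site_field hL 1768 4 (by omega) (by omega) rfl
      exact check_site hinvE (hun.trans hun2) hs (by u_omega)
    · -- 0x10d775, the exit join, with r12d = −1
      refine ReachVia.done (Or.inl ?_)
      have hEq : Mem.EqOn ((e.reg .rsp).toNat - 48) ((e.reg .rsp).toNat + 8) u.mem s_10d8de.mem := by
        u_memnorm
        u_eqon
      have hunF : ShadowUntouched u.mem s_10d8de.mem := by v_untouched
      have hsameF : Mem.SameExcept
          [⟨(e.reg .rsp).toNat - 384, (e.reg .rsp).toNat⟩,
           ⟨(e.reg .rdi).toNat + 48, (e.reg .rdi).toNat + 56⟩, ⟨(e.reg .rdi).toNat + 84, (e.reg .rdi).toNat + 96⟩,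
           ⟨(e.reg .rdi).toNat + 136, (e.reg .rdi).toNat + 144⟩, ⟨(e.reg .rdi).toNat + 1484, (e.reg .rdi).toNat + 1749⟩,
           ⟨(e.reg .rdi).toNat + 1752, (e.reg .rdi).toNat + 1784⟩] e.mem s_10d8de.mem := by
        u_same
      refine ⟨w_rip, mid_carry hmidU (by omega) (by omega) hEq w_rsp ?_ w_eq (abiInv_of ?_ ?_) (hun.trans hunF),
        ?_, ?_, ?_⟩
      · simp only [X86.User.Spec.footprint, vspec]
        exact hsameF
      · rw [w_flags]
        exact w_df_10d8c9
      · rw [w_mxcsr]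
        exact w_mx
      · -- the reader's post: `error` wrote `f->error` and its own frame, the last store is `valid_bits := 0`
        rw [w_mem]
        refine exit_reader hreader (ws := [⟨(e.reg .rsp).toNat - 384, (e.reg .rsp).toNat - 56⟩,
          ⟨(e.reg .rdi).toNat + 140, (e.reg .rdi).toNat + 144⟩]) ?_ ?_ _ ?_ 0#32 (by decide)
        · u_same
        · simp only [List.forall_mem_cons, List.not_mem_nil, false_imp_iff, implies_true, and_true]
          omega
        · rw [← addr_add_lit, addr_toNat]
      · rw [w_r12]
        decide
      · rw [w_r12]
        exact Or.inl result_m1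
  · -- 0x10d7eb (C line 1725): inside the loop, `i < c->entries`
    have hlt : i < ent := by
      rw [hcmpE, hcmpI] at hbr_10d7e1
      omega
    obtain ⟨hclw1, hclw2, hclw3⟩ := hclw (by omega)
    obtain ⟨hcww1, hcww2, hcww3⟩ := hcww (by omega)
    clear hclw hcww
    have ha1 := addr_length i clp (by omega) (by omega)
    have ha2 := addr_codeword i cwp (by omega) (by omega)
    -- the values the body loads: `codeword_lengths[i]`, `codewords[i]`, `f->acc`, `f->valid_bits`
    obtain ⟨lb, hlb⟩ : ∃ lb : Nat, s_10d8ab.mem.readLE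
        (Word.ofBV (BitVec.signExtend 64 (Word.part .w32 (UInt64.ofNat i))) + UInt64.ofNat clp) 1 = lb := ⟨_, rfl⟩
    obtain ⟨cwv, hcwv⟩ : ∃ cwv : Nat, s_10d8ab.mem.readLE
        (UInt64.ofNat cwp + Word.ofBV (BitVec.signExtend 64 (Word.part .w32 (UInt64.ofNat i))) * 4) 4 = cwv := ⟨_, rfl⟩
    obtain ⟨accv, haccv⟩ : ∃ accv : Nat, s_10d8ab.mem.readLE (e.reg .rdi + 1764) 4 = accv := ⟨_, rfl⟩
    obtain ⟨vbv, hvbv⟩ : ∃ vbv : Nat, s_10d8ab.mem.readLE (e.reg .rdi + 1768) 4 = vbv := ⟨_, rfl⟩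
    u_walk hcode [hμ.vendor] until [Vorbis.L.codebook_decode_scalar_raw.loop2, Vorbis.L.codebook_decode_scalar_raw.cut5] span [Vorbis.L.textLo, Vorbis.L.textHi] side (v_side)
    · -- 0x10d7eb: load8 of `c->codeword_lengths` (the field at c + 8)
      have hun1 : ShadowUntouched u.mem s_10d7eb.mem := by v_untouched
      have hin8 : 8 + 8 ≤ Off.sizeof.Codebook := by
        simp only [voff]
        omega
      have hs : Site (Live (stackObjs frames ++ others)) ((e.reg .rsi).toNat + 8) 8 :=
        Codebook.site_field hL hB hBin 8 8 hin8 (by omega) rfl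
      exact check_site hinvE (hun.trans hun1) hs (by u_omega)
    · -- 0x10d7fd: load1 of `c->codeword_lengths[i]`, i < entries (K3n)
      have hun1 : ShadowUntouched u.mem s_10d7fd.mem := by v_untouched
      have hs : Site (Live (stackObjs frames ++ others)) (clp + i) 1 := by
        refine hcb.site_codeword_lengths hL i ?_ ?_
        · rw [Codebook.N_dense hsp0, hentI]
          omega
        · rw [← hclpd]
          rfl
      exact check_site hinvE (hun.trans hun1) hs ha1
    · -- 0x10d816: load4 of `c->codewords[i]`, i < entries (K3n)
      have hun1 : ShadowUntouched u.mem s_10d816.mem := by v_untouched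
      have hs : Site (Live (stackObjs frames ++ others)) (cwp + 4 * i) 4 := by
        refine hcb.site_codewords hL hsp0 i ?_ ?_
        · rw [hentI]
          omega
        · rw [← hcwpd]
          rfl
      exact check_site hinvE (hun.trans hun1) hs ha2
    · -- 0x10d82a: load4 of `f->acc`
      have hun1 : ShadowUntouched u.mem s_10d82a.mem := by v_untouched
      have hs : Site (Live (stackObjs frames ++ others)) ((e.reg .rdi).toNat + 1764) 4 :=
        hbitsU.site_field hL 1764 4 (by omega) (by omega) rfl
      exact check_site hinvE (hun.trans hun1) hs (by u_omega)
    · -- 0x10d85c: load4 of `f->valid_bits`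
      have hun1 : ShadowUntouched u.mem s_10d85c.mem := by v_untouched
      have hs : Site (Live (stackObjs frames ++ others)) ((e.reg .rdi).toNat + 1768) 4 :=
        hbitsU.site_field hL 1768 4 (by omega) (by omega) rfl
      exact check_site hinvE (hun.trans hun1) hs (by u_omega)
    · -- 0x10d88c: load1 of `c->codeword_lengths[i]` again
      have hun1 : ShadowUntouched u.mem s_10d88c.mem := by v_untouched
      have hs : Site (Live (stackObjs frames ++ others)) (clp + i) 1 := by
        refine hcb.site_codeword_lengths hL i ?_ ?_
        · rw [Codebook.N_dense hsp0, hentI]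
          omega
        · rw [← hclpd]
          rfl
      exact check_site hinvE (hun.trans hun1) hs ha1
    · -- the back edge from 0x10d808 (`codeword_lengths[i] == NO_CODE`: continue)
      u_loop_back [i + 1]
      · rw [w_r12]
        exact r12_next i (by omega)
      · omega
      · rw [w_flags]
        simp only [X86.User.df_setStatus]
        with_reducible assumption
      · rw [w_mxcsr]
        exact hmxS
      · rw [w_r12, r12_next i (by omega), toNat_ofNat_small i (by omega), toNat_ofNat_small (i + 1) (by omega)]
        omega
    · -- the back edge from 0x10d84e (no match: continue)
      u_loop_back [i + 1]
      · rw [w_r12]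
        exact r12_next i (by omega)
      · omega
      · rw [w_flags]
        simp only [X86.User.df_setStatus]
        with_reducible assumption
      · rw [w_mxcsr]
        exact hmxS
      · rw [w_r12, r12_next i (by omega), toNat_ofNat_small i (by omega), toNat_ofNat_small (i + 1) (by omega)]
        omega
    · -- 0x10d7c1 (C lines 1732 – 1733): the code matched but `valid_bits < len`: `f->valid_bits = 0 ; return -1`
      refine ReachVia.done (Or.inl ?_)
      have hEq : Mem.EqOn ((e.reg .rsp).toNat - 48) ((e.reg .rsp).toNat + 8) u.mem s_10d7d6.mem := by
        u_memnorm
        u_eqon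
      have hunF : ShadowUntouched u.mem s_10d7d6.mem := by v_untouched
      have hsameF : Mem.SameExcept
          [⟨(e.reg .rsp).toNat - 384, (e.reg .rsp).toNat⟩,
           ⟨(e.reg .rdi).toNat + 48, (e.reg .rdi).toNat + 56⟩, ⟨(e.reg .rdi).toNat + 84, (e.reg .rdi).toNat + 96⟩,
           ⟨(e.reg .rdi).toNat + 136, (e.reg .rdi).toNat + 144⟩, ⟨(e.reg .rdi).toNat + 1484, (e.reg .rdi).toNat + 1749⟩,
           ⟨(e.reg .rdi).toNat + 1752, (e.reg .rdi).toNat + 1784⟩] e.mem s_10d7d6.mem := by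
        u_same
      refine ⟨w_rip, mid_carry hmidU (by omega) (by omega) hEq w_rsp ?_ w_eq (abiInv_of ?_ ?_) (hun.trans hunF),
        ?_, ?_, ?_⟩
      · simp only [X86.User.Spec.footprint, vspec]
        exact hsameF
      · rw [w_flags]
        simp only [X86.User.df_setStatus]
        exact w_df_10d85c
      · rw [w_mxcsr]
        exact hmxS
      · rw [w_mem]
        refine exit_reader hreader (ws := [⟨(e.reg .rsp).toNat - 384, (e.reg .rsp).toNat - 56⟩]) ?_ ?_ _ ?_ 0#32
          (by decide)
        · u_same
        · simp only [List.forall_mem_cons, List.not_mem_nil, false_imp_iff, implies_true, and_true]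
          omega
        · rw [← addr_add_lit, addr_toNat]
      · rw [w_r12]
        decide
      · rw [w_r12]
        exact Or.inl result_m1
    · -- 0x10d876 – 0x10d8a0 (C lines 1728 – 1730): the match: `f->acc >>= len ; f->valid_bits -= len ; return i`
      refine ReachVia.done (Or.inl ?_)
      have hEq : Mem.EqOn ((e.reg .rsp).toNat - 48) ((e.reg .rsp).toNat + 8) u.mem s_10d8a0.mem := by
        u_memnorm
        u_eqon
      have hunF : ShadowUntouched u.mem s_10d8a0.mem := by v_untouched
      have hsameF : Mem.SameExcept
          [⟨(e.reg .rsp).toNat - 384, (e.reg .rsp).toNat⟩,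
           ⟨(e.reg .rdi).toNat + 48, (e.reg .rdi).toNat + 56⟩, ⟨(e.reg .rdi).toNat + 84, (e.reg .rdi).toNat + 96⟩,
           ⟨(e.reg .rdi).toNat + 136, (e.reg .rdi).toNat + 144⟩, ⟨(e.reg .rdi).toNat + 1484, (e.reg .rdi).toNat + 1749⟩,
           ⟨(e.reg .rdi).toNat + 1752, (e.reg .rdi).toNat + 1784⟩] e.mem s_10d8a0.mem := by
        u_same
      -- V1 at the loop head, about the value `vbv` the body loaded
      have hbS := (reader_windows hbitsU hS (by
        simp only [List.forall_mem_cons, List.not_mem_nil, false_imp_iff, implies_true, and_true]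
        omega)).1
      have hV1 := hbS.V1
      have hvb : stb_vorbis.valid_bits s_10d8ab.mem (e.reg .rdi).toNat = sint32 vbv := by
        simp only [vacc, voff]
        show sint32 (s_10d8ab.mem.readLE (addr ((e.reg .rdi).toNat + 1768)) 4) = _
        rw [← addr_add_lit, addr_toNat, hvbv]
      rw [hvb] at hV1
      have hv : vbv < 2 ^ 32 := by
        rw [← hvbv]
        exact Mem.readLE_lt' _ _ 4
      -- the fields of the struct at `c` read the same at the function's entry
      have hsf : Codebook.SameFields e.mem u.mem (e.reg .rsi).toNat := by
        refine book_same hsame (by omega) ?_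
        simp only [List.forall_mem_cons, List.not_mem_nil, false_imp_iff, implies_true, and_true]
        omega
      refine ⟨w_rip, mid_carry hmidU (by omega) (by omega) hEq w_rsp ?_ w_eq (abiInv_of ?_ ?_) (hun.trans hunF),
        ?_, ?_, ?_⟩
      · simp only [X86.User.Spec.footprint, vspec]
        exact hsameF
      · rw [w_flags]
        simp only [X86.User.df_setStatus]
        exact w_df_10d88c
      · rw [w_mxcsr]
        exact hmxS
      · rw [w_mem]
        refine exit_reader hreader (ws := [⟨(e.reg .rsp).toNat - 384, (e.reg .rsp).toNat - 56⟩,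
          ⟨(e.reg .rdi).toNat + 1764, (e.reg .rdi).toNat + 1768⟩]) ?_ ?_ _ ?_ _ (v1_after_sub vbv lb hv hV1 hbr_10d870)
        · u_same
        · simp only [List.forall_mem_cons, List.not_mem_nil, false_imp_iff, implies_true, and_true]
          omega
        · rw [← addr_add_lit, addr_toNat]
      · rw [w_r12, toNat_ofNat_small i (by omega)]
        omega
      · rw [w_r12, result_i i (by omega)]
        refine hpre.cb.decodeRaw_linear ?_ i ?_
        · rw [← hsf.sparse]
          exact hsp0
        · rw [← hsf.entries, hentI]
          omega

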